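-- pv_equiv track=rewrite | github.com/dimoynwa/AI-homeworks | frogs.py | generate_start_and_goal_arrays
-- ===== SOURCE A (Python) =====
-- def generate_start_and_goal_arrays(number):
--     start_array = []
--     goal_array = []
--     for i in range(number):
--         start_array.append('>')
--         goal_array.append('<')
--     start_array.append('_')
--     goal_array.append('_')
--     for i in range(number):
--         start_array.append('<')
--         goal_array.append('>')
--     return start_array, goal_array
-- ===== SOURCE B (Python) =====
-- def generate_start_and_goal_arrays(number):
--     # One pass over all 2*number+1 board positions, classifying each position
--     # by where it sits relative to the blank; the goal board is the start
--     # board read right-to-left.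
--     start_array = []
--     for i in range(2 * number + 1):
--         if i < number:
--             start_array.append('>')
--         elif i == number:
--             start_array.append('_')
--         else:
--             start_array.append('<')
--     goal_array = start_array[::-1]
--     return start_array, goal_array
-- ===== Notes on version B (the rewrite author's own statement) =====
-- stated objective: alternative
-- what changed: B makes a single pass over all 2n+1 board positions, classifying each index relative to the blank, and derives the goal board as the reversal of the start board, instead of A's two phase-loops appending to two parallel arrays; Pre_ restricts to nonnegative counts, the task's natural domain.
-- outside the precondition, e.g. on generate_start_and_goal_arrays(-1): A returns (['_'], ['_']), B returns ([], [])
import Mathlib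
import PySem

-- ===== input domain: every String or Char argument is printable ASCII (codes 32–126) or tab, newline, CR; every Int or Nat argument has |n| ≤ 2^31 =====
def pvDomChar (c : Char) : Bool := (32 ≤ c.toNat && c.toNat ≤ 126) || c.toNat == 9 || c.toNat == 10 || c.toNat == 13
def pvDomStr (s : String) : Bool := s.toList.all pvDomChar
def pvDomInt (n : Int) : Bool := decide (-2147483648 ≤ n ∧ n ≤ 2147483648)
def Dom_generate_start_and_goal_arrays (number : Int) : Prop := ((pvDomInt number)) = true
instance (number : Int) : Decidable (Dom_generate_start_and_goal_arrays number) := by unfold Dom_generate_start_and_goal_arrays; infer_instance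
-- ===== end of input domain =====

-- B classifies each of the 2n+1 board positions in one pass and reverses for the goal (alternative decomposition; Pre_ restricts to nonnegative counts, the natural domain).


-- ===== PORT A =====
-- Literal port of A: two foldl loops over range(number) appending to parallel accumulators.
def generate_start_and_goal_arrays (number : Int) : List String × List String :=
  let init : List String × List String := ([], [])
  let p1 := (PySem.List.pyRange 0 number 1).foldl
      (fun (p : List String × List String) _ => (p.1 ++ [">"], p.2 ++ ["<"])) init
  let p2 := (p1.1 ++ ["_"], p1.2 ++ ["_"])
  let p3 := (PySem.List.pyRange 0 number 1).foldl
      (fun (p : List String × List String) _ => (p.1 ++ ["<"], p.2 ++ [">"])) p2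
  p3

-- ===== PORT B =====
-- Port of B: one loop over range(2*number+1) classifying each index; goal = reversal of start.
def generate_start_and_goal_arrays_alt (number : Int) : List String × List String :=
  let start_array := (PySem.List.pyRange 0 (2 * number + 1) 1).foldl
      (fun (acc : List String) i =>
        acc ++ [if i < number then ">" else if i = number then "_" else "<"]) []
  let goal_array := start_array.reverse
  (start_array, goal_array)

-- ===== PRECONDITION & SPEC =====
-- Pre_ restricts to nonnegative counts, the natural domain of a frog count
-- (A returns the degenerate (['_'], ['_']) for negative numbers; B returns ([], [])).
def Pre_generate_start_and_goal_arrays (number : Int) : Prop := 0 ≤ number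
instance (number : Int) : Decidable (Pre_generate_start_and_goal_arrays number) := by unfold Pre_generate_start_and_goal_arrays; infer_instance
def pvWitness_generate_start_and_goal_arrays : Int := 3
def Spec_generate_start_and_goal_arrays (number : Int) (out : List String × List String) : Prop := out = generate_start_and_goal_arrays_alt number
instance (number : Int) (out : List String × List String) : Decidable (Spec_generate_start_and_goal_arrays number out) := by unfold Spec_generate_start_and_goal_arrays; infer_instance

-- ===== CLAIM (what is proved, stated in full; the proofs are below) =====
def Claim_equal_generate_start_and_goal_arrays : Prop := ∀ (number : Int), Dom_generate_start_and_goal_arrays number → Pre_generate_start_and_goal_arrays number → Spec_generate_start_and_goal_arrays number (generate_start_and_goal_arrays number)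

-- ===== LEMMAS AND PROOFS =====

-- A's parallel append loops build two replicate blocks.
theorem pvA_foldl_rep (l : List Int) (a b : List String) (x y : String) :
    l.foldl (fun (p : List String × List String) _ => (p.1 ++ [x], p.2 ++ [y])) (a, b)
      = (a ++ List.replicate l.length x, b ++ List.replicate l.length y) := by
  induction l generalizing a b with
  | nil => simp
  | cons h t ih =>
    simp only [List.foldl_cons, ih, List.length_cons]
    simp [List.replicate_succ, List.append_assoc]

-- B's append-fold is a map.
theorem pvB_foldl_map (l : List Int) (acc : List String) (f : Int → String) :
    l.foldl (fun (a : List String) i => a ++ [f i]) acc = acc ++ l.map f := by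
  induction l generalizing acc with
  | nil => simp
  | cons h t ih => simp [ih, List.append_assoc]

-- The classifier mapped over range(2n+1) yields the three blocks.
theorem pvB_classify (n : Nat) (number : Int) (hn : number = (n : Int)) :
    (PySem.List.pyRange 0 (2 * number + 1) 1).map
        (fun i => if i < number then ">" else if i = number then "_" else "<")
      = List.replicate n ">" ++ ["_"] ++ List.replicate n "<" := by
  subst hn
  have h1 : (0 : Int) ≤ (n : Int) := by positivity
  have h2 : (n : Int) ≤ (n : Int) + 1 := by omega
  have h3 : (n : Int) + 1 ≤ 2 * (n : Int) + 1 := by omega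
  rw [PySem.List.pyRange_one_append 0 (n : Int) (2 * (n : Int) + 1) h1 (by omega),
      PySem.List.pyRange_one_append (n : Int) ((n : Int) + 1) (2 * (n : Int) + 1) h2 h3,
      PySem.List.pyRange_one_singleton]
  simp only [List.map_append, List.append_assoc]
  congr 1
  · have : ∀ x ∈ PySem.List.pyRange 0 (n : Int) 1,
        (if x < (n : Int) then ">" else if x = (n : Int) then "_" else "<") = ">" := by
      intro x hx
      rw [PySem.List.mem_pyRange_one] at hx
      simp [hx.2]
    calc (PySem.List.pyRange 0 (n : Int) 1).map
          (fun i => if i < (n : Int) then ">" else if i = (n : Int) then "_" else "<")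
        = (PySem.List.pyRange 0 (n : Int) 1).map (fun _ => ">") := List.map_congr_left this
      _ = List.replicate n ">" := by
          rw [List.map_const']
          congr 1
          simp [PySem.List.length_pyRange_one]
  · congr 1
    · simp
    · have : ∀ x ∈ PySem.List.pyRange ((n : Int) + 1) (2 * (n : Int) + 1) 1,
          (if x < (n : Int) then ">" else if x = (n : Int) then "_" else "<") = "<" := by
        intro x hx
        rw [PySem.List.mem_pyRange_one] at hx
        have h4 : ¬ x < (n : Int) := by omega
        have h5 : ¬ x = (n : Int) := by omega
        simp [h4, h5]
      calc (PySem.List.pyRange ((n : Int) + 1) (2 * (n : Int) + 1) 1).map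
            (fun i => if i < (n : Int) then ">" else if i = (n : Int) then "_" else "<")
          = (PySem.List.pyRange ((n : Int) + 1) (2 * (n : Int) + 1) 1).map (fun _ => "<") :=
            List.map_congr_left this
        _ = List.replicate n "<" := by
            rw [List.map_const']
            congr 1
            rw [PySem.List.length_pyRange_one]
            omega

-- ===== VERDICT (by name: the statement is the Claim_ definition above) =====
theorem generate_start_and_goal_arrays_spec : Claim_equal_generate_start_and_goal_arrays := by
  intro number _ hpre
  unfold Pre_generate_start_and_goal_arrays at hpre
  obtain ⟨n, hn⟩ : ∃ n : Nat, number = (n : Int) := ⟨number.toNat, by omega⟩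
  unfold Spec_generate_start_and_goal_arrays generate_start_and_goal_arrays
    generate_start_and_goal_arrays_alt
  simp only [pvA_foldl_rep, pvB_foldl_map, List.nil_append, pvB_classify n number hn,
    PySem.List.length_pyRange_one]
  subst hn
  have hlen : ((n : Int) - 0).toNat = n := by omega
  rw [hlen]
  refine Prod.ext ?_ ?_
  · simp [List.append_assoc]
  · simp [List.reverse_append, List.append_assoc]
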